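-- pv_equiv track=rewrite | github.com/md-vasim/hacker-rank-solutions | sparse array.py | matchStrings_old
-- ===== SOURCE A (Python) =====
-- def matchStrings_old(strings, queries):
--     c = []
--     p = []
--     for q in queries:
--         q_c = 0
--         for s in strings:
--             if q == s and q not in p:
--                 q_c += 1
--         c.append(q_c)
--         p.append(q)
--
--     return c
-- ===== SOURCE B (Python) =====
-- def matchStrings_old(strings, queries):
--     counts = {}
--     for s in strings:
--         counts[s] = counts.get(s, 0) + 1
--     seen = set()
--     res = []
--     for q in queries:
--         res.append(0 if q in seen else counts.get(q, 0))
--         seen.add(q)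
--     return res
-- ===== Notes on version B (the rewrite author's own statement) =====
-- stated objective: faster
-- what changed: Replaced the per-query scan over all strings (with a linear membership test on the list of previous queries inside the inner loop) by a frequency dictionary built once over strings plus a seen-set over queries, answering each query by one hash lookup.
import Mathlib
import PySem

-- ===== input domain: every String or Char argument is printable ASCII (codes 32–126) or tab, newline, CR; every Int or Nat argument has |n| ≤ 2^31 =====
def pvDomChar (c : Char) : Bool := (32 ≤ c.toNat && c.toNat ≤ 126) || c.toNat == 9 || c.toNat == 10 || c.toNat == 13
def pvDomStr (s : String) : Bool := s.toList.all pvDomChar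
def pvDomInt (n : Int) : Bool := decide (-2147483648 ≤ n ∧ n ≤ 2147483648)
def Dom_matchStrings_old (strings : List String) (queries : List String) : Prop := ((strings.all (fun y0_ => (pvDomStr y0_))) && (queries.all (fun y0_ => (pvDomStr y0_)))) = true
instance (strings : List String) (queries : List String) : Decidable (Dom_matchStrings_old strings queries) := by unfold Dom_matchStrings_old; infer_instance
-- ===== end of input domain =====

-- B replaces A's quadratic per-query scans by a frequency dictionary over strings plus a seen-set (faster).


-- ===== PORT A =====
def matchStrings_old (strings : List String) (queries : List String) : List Int :=
  (queries.foldl (fun (st : List Int × List String) q =>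
      let q_c : Int := strings.foldl (fun q_c s => if q = s ∧ q ∉ st.2 then q_c + 1 else q_c) 0
      (st.1 ++ [q_c], st.2 ++ [q])) ([], [])).1

-- ===== PORT B =====
def matchStrings_old_alt (strings : List String) (queries : List String) : List Int :=
  let counts : PySem.Dict String Int :=
    strings.foldl (fun d s => d.insert s (d.getD s 0 + 1)) PySem.Dict.empty
  (queries.foldl (fun (st : List Int × PySem.Set String) q =>
      (st.1 ++ [if PySem.Set.contains st.2 q then 0 else counts.getD q 0], PySem.Set.add st.2 q))
    ([], PySem.Set.empty)).1

-- ===== PRECONDITION & SPEC =====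
def Spec_matchStrings_old (strings : List String) (queries : List String) (out : List Int) : Prop := out = matchStrings_old_alt strings queries
instance (strings : List String) (queries : List String) (out : List Int) : Decidable (Spec_matchStrings_old strings queries out) := by unfold Spec_matchStrings_old; infer_instance

-- ===== CLAIM (what is proved, stated in full; the proofs are below) =====
def Claim_equal_matchStrings_old : Prop := ∀ (strings : List String) (queries : List String), Dom_matchStrings_old strings queries → Spec_matchStrings_old strings queries (matchStrings_old strings queries)

-- ===== LEMMAS AND PROOFS =====

-- A's inner loop over strings computes 0 if q was already queried, else the multiplicity of q in strings.
theorem pv_inner_eq (strings : List String) (q : String) (p : List String) :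
    strings.foldl (fun q_c s => if q = s ∧ q ∉ p then q_c + 1 else q_c) (0 : Int)
      = if q ∈ p then 0 else (strings.count q : Int) := by
  by_cases hp : q ∈ p
  · simp only [hp, not_true_eq_false, and_false, if_false, if_true]
    induction strings with
    | nil => rfl
    | cons s ss ih => simp [ih]
  · rw [PySem.List.foldl_ite_add_one]
    have hpred : (fun x => decide (q = x ∧ q ∉ p)) = (fun x => x == q) := by
      funext x; simp [hp, eq_comm, Bool.beq_eq_decide_eq]
    rw [hpred, ← List.count_eq_countP]
    simp [hp]

-- B's counter lookup is the multiplicity of q in strings.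
theorem pv_counts_eq (strings : List String) (q : String) :
    (strings.foldl (fun d s => d.insert s (d.getD s 0 + 1)) (PySem.Dict.empty : PySem.Dict String Int)).getD q 0
      = (strings.count q : Int) := by
  rw [PySem.Dict.getD_foldl_insert_add_one]
  simp [PySem.Dict.getD_empty]

-- The two query loops agree whenever the previous-queries list and the seen-set have the same members.
theorem pv_loops_eq (strings : List String) (queries : List String)
    (c : List Int) (p : List String) (seen : PySem.Set String)
    (h : ∀ x, x ∈ p ↔ x ∈ seen) :
    (queries.foldl (fun (st : List Int × List String) q =>
        let q_c : Int := strings.foldl (fun q_c s => if q = s ∧ q ∉ st.2 then q_c + 1 else q_c) 0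
        (st.1 ++ [q_c], st.2 ++ [q])) (c, p)).1
    = (queries.foldl (fun (st : List Int × PySem.Set String) q =>
        (st.1 ++ [if PySem.Set.contains st.2 q then 0 else
          (strings.foldl (fun d s => d.insert s (d.getD s 0 + 1)) (PySem.Dict.empty : PySem.Dict String Int)).getD q 0],
          PySem.Set.add st.2 q)) (c, seen)).1 := by
  induction queries generalizing c p seen with
  | nil => rfl
  | cons q qs ih =>
    simp only [List.foldl_cons]
    rw [pv_inner_eq, pv_counts_eq]
    have hmem : (PySem.Set.contains seen q) = decide (q ∈ p) := by
      by_cases hq : q ∈ p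
      · simp [hq, (h q).mp hq]
      · simp [hq]
        exact fun hs => hq ((h q).mpr hs)
    have : (if q ∈ p then (0 : Int) else (strings.count q : Int))
        = (if PySem.Set.contains seen q then 0 else (strings.count q : Int)) := by
      rw [hmem]; by_cases hq : q ∈ p <;> simp [hq]
    rw [this]
    exact ih _ _ _ (fun x => by
      simp only [List.mem_append, List.mem_singleton, PySem.Set.mem_add, h x])

-- ===== VERDICT (by name: the statement is the Claim_ definition above) =====
theorem matchStrings_old_spec : Claim_equal_matchStrings_old := by
  intro strings queries _
  unfold Spec_matchStrings_old matchStrings_old matchStrings_old_alt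
  exact pv_loops_eq strings queries [] [] PySem.Set.empty (fun x => by simp [PySem.Set.empty])
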